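-- pv_equiv track=rewrite | github.com/cs-anonymous-researcher/ADVICE | src/utility/workload_spec.py | release_light_join_origin
-- ===== SOURCE A (Python) =====
-- release_foreign_mapping = {
--     "release_label": ("release", "release", "id"),
--     "release_tag": ("release", "release", "id"),
--     "release_country": ("release", "release", "id"),
--     "medium": ("release", "release", "id"),
--     "release_meta": ("id", "release", "id"),
--     # "release": ("release_group", "release_group", "id"), 采用反向避免dict引发的问题
--     # "release": ("artist_credit", "artist_credit", "id")
--     "release_group": ("id", "release", "release_group"),
--     "artist_credit": ("id", "release", "artist_credit")
-- }
--
-- def release_light_join_origin(schema_list, abbr_mapping):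
--     """
--     {Description}
--
--     Args:
--         arg1:
--         arg2:
--     Returns:
--         res1:
--         res2:
--     """
--     item_list = []
--     if "release" in schema_list:
--         # 包含release的情况
--         for s in schema_list:
--             if s == "release":
--                 continue
--             else:
--                 src_col, ref_table, ref_col = release_foreign_mapping[s]
--                 item_list.append("{}.{}={}.{}".format(abbr_mapping[s], src_col, abbr_mapping[ref_table], ref_col))
--     else:
--         # 不包含release的情况
--         ref_col_dict = {}
--
--         for s in schema_list:
--             src_col, ref_table, ref_col = release_foreign_mapping[s]
--             # 添加和主键表的连接
--             if (ref_table, ref_col) not in ref_col_dict.keys():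
--                 # 如果是第一次出现的等价类，设置连接的参考表
--                 ref_col_dict[(ref_table, ref_col)] = s, src_col
--             else:
--                 join_tbl, join_col = ref_col_dict[(ref_table, ref_col)]
--                 item_list.append("{}.{}={}.{}".\
--                     format(abbr_mapping[s], src_col, abbr_mapping[join_tbl], join_col))
--
--     return item_list
-- ===== SOURCE B (Python) =====
-- release_foreign_mapping = {
--     "release_label": ("release", "release", "id"),
--     "release_tag": ("release", "release", "id"),
--     "release_country": ("release", "release", "id"),
--     "medium": ("release", "release", "id"),
--     "release_meta": ("id", "release", "id"),
--     "release_group": ("id", "release", "release_group"),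
--     "artist_credit": ("id", "release", "artist_credit")
-- }
--
-- def release_light_join_origin(schema_list, abbr_mapping):
--     # One anchor dict keyed by (ref_table, ref_col); pre-seeded with 'release'
--     # as the anchor of every class when 'release' is present, then a single
--     # emit loop over schema_list.
--     anchors = {}
--     if "release" in schema_list:
--         for _src, ref_table, ref_col in release_foreign_mapping.values():
--             anchors[(ref_table, ref_col)] = ("release", ref_col)
--     item_list = []
--     for s in schema_list:
--         if s == "release":
--             continue
--         src_col, ref_table, ref_col = release_foreign_mapping[s]
--         anchor = anchors.get((ref_table, ref_col))
--         if anchor is not None: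
--             a_tbl, a_col = anchor
--             item_list.append("{}.{}={}.{}".format(abbr_mapping[s], src_col, abbr_mapping[a_tbl], a_col))
--         else:
--             anchors[(ref_table, ref_col)] = s, src_col
--     return item_list
-- ===== Notes on version B (the rewrite author's own statement) =====
-- stated objective: simpler
-- what changed: Replaces A's two separate branch loops (a release-specific emit loop and an anchor-dict loop) with one anchor dictionary pre-seeded with 'release' when present and a single unified emit loop over schema_list.
import Mathlib
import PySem

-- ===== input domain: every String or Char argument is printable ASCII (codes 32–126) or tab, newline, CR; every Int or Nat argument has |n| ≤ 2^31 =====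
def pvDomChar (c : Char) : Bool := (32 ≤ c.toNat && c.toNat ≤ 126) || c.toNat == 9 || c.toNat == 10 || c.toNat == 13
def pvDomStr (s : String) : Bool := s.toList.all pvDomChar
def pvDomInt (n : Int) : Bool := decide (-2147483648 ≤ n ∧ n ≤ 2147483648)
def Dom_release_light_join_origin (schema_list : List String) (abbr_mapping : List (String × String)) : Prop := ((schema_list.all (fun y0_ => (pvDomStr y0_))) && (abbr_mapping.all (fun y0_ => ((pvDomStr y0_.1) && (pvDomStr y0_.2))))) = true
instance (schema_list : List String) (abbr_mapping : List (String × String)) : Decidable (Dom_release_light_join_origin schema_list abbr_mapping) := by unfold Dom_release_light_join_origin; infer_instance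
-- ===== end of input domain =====

-- B unifies A's two branch loops into one emit loop over an anchor dictionary
-- pre-seeded with 'release' when 'release' is present (objective: simpler).

-- ===== PORT A =====
-- module-level constant release_foreign_mapping (shared by both ports)
def releaseForeignMapping : PySem.Dict String (String × String × String) :=
  PySem.Dict.mk
    [("release_label", ("release", "release", "id")),
     ("release_tag", ("release", "release", "id")),
     ("release_country", ("release", "release", "id")),
     ("medium", ("release", "release", "id")),
     ("release_meta", ("id", "release", "id")),
     ("release_group", ("id", "release", "release_group")),
     ("artist_credit", ("id", "release", "artist_credit"))]

-- "{}.{}={}.{}".format(a, b, c, d)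
def fmtJoin (a b c d : String) : String := a ++ "." ++ b ++ "=" ++ c ++ "." ++ d

-- body of A's loop in the '"release" in schema_list' branch (KeyError = none, excluded by Pre_)
def stepRel (abbr_mapping : List (String × String)) (item_list : List String) (s : String) : List String :=
  if s = "release" then item_list
  else
    match PySem.Dict.get? releaseForeignMapping s with
    | none => item_list
    | some (src_col, ref_table, ref_col) =>
      match PySem.Dict.get? (PySem.Dict.mk abbr_mapping) s,
            PySem.Dict.get? (PySem.Dict.mk abbr_mapping) ref_table with
      | some a1, some a2 => item_list ++ [fmtJoin a1 src_col a2 ref_col]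
      | _, _ => item_list

-- body of A's loop in the other branch; state = (item_list, ref_col_dict)
def stepElse (abbr_mapping : List (String × String))
    (st : List String × PySem.Dict (String × String) (String × String)) (s : String) :
    List String × PySem.Dict (String × String) (String × String) :=
  match PySem.Dict.get? releaseForeignMapping s with
  | none => st
  | some (src_col, ref_table, ref_col) =>
    match PySem.Dict.get? st.2 (ref_table, ref_col) with
    | none => (st.1, PySem.Dict.insert st.2 (ref_table, ref_col) (s, src_col))
    | some (join_tbl, join_col) =>
      match PySem.Dict.get? (PySem.Dict.mk abbr_mapping) s,
            PySem.Dict.get? (PySem.Dict.mk abbr_mapping) join_tbl with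
      | some a1, some a2 => (st.1 ++ [fmtJoin a1 src_col a2 join_col], st.2)
      | _, _ => st

def release_light_join_origin (schema_list : List String) (abbr_mapping : List (String × String)) : List String :=
  if schema_list.contains "release" then
    schema_list.foldl (stepRel abbr_mapping) []
  else
    (schema_list.foldl (stepElse abbr_mapping) ([], PySem.Dict.empty)).1

-- ===== PORT B =====
-- pre-seeding loop over release_foreign_mapping.values()
def seedAnchors : PySem.Dict (String × String) (String × String) :=
  releaseForeignMapping.items.foldl
    (fun d kv => PySem.Dict.insert d (kv.2.2.1, kv.2.2.2) ("release", kv.2.2.2))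
    PySem.Dict.empty

-- body of B's single emit loop; state = (item_list, anchors)
def stepB (abbr_mapping : List (String × String))
    (st : List String × PySem.Dict (String × String) (String × String)) (s : String) :
    List String × PySem.Dict (String × String) (String × String) :=
  if s = "release" then st
  else
    match PySem.Dict.get? releaseForeignMapping s with
    | none => st
    | some (src_col, ref_table, ref_col) =>
      match PySem.Dict.get? st.2 (ref_table, ref_col) with
      | some (a_tbl, a_col) =>
        match PySem.Dict.get? (PySem.Dict.mk abbr_mapping) s,
              PySem.Dict.get? (PySem.Dict.mk abbr_mapping) a_tbl with
        | some a1, some a2 => (st.1 ++ [fmtJoin a1 src_col a2 a_col], st.2)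
        | _, _ => st
      | none => (st.1, PySem.Dict.insert st.2 (ref_table, ref_col) (s, src_col))

def release_light_join_origin_alt (schema_list : List String) (abbr_mapping : List (String × String)) : List String :=
  let anchors0 := if schema_list.contains "release" then seedAnchors else PySem.Dict.empty
  (schema_list.foldl (stepB abbr_mapping) ([], anchors0)).1

-- ===== PRECONDITION & SPEC =====
-- the foreign-key class (ref_table, ref_col) of a schema, for stating the precondition
def rfmKey (s : String) : Option (String × String) :=
  (PySem.Dict.get? releaseForeignMapping s).map (fun v => (v.2.1, v.2.2))

-- Pre_ excludes exactly the inputs on which the Python A raises KeyError: a schema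
-- missing from release_foreign_mapping, or a schema (or its join anchor) that gets
-- formatted but is missing from abbr_mapping.
def Pre_release_light_join_origin (schema_list : List String) (abbr_mapping : List (String × String)) : Prop :=
  if schema_list.contains "release" then
    (∀ s ∈ schema_list, s ≠ "release" →
      (PySem.Dict.get? releaseForeignMapping s).isSome = true ∧
      (PySem.Dict.get? (PySem.Dict.mk abbr_mapping) s).isSome = true) ∧
    ((∃ s ∈ schema_list, s ≠ "release") →
      (PySem.Dict.get? (PySem.Dict.mk abbr_mapping) "release").isSome = true)
  else
    (∀ s ∈ schema_list, (PySem.Dict.get? releaseForeignMapping s).isSome = true) ∧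
    (∀ s ∈ schema_list, 2 ≤ schema_list.countP (fun t => rfmKey t == rfmKey s) →
      (PySem.Dict.get? (PySem.Dict.mk abbr_mapping) s).isSome = true)

instance (schema_list : List String) (abbr_mapping : List (String × String)) : Decidable (Pre_release_light_join_origin schema_list abbr_mapping) := by unfold Pre_release_light_join_origin; infer_instance

def pvWitness_release_light_join_origin : List String × (List (String × String)) :=
  (["release", "release_label", "medium"],
   [("release", "r"), ("release_label", "rl"), ("medium", "m")])

def Spec_release_light_join_origin (schema_list : List String) (abbr_mapping : List (String × String)) (out : List String) : Prop := out = release_light_join_origin_alt schema_list abbr_mapping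
instance (schema_list : List String) (abbr_mapping : List (String × String)) (out : List String) : Decidable (Spec_release_light_join_origin schema_list abbr_mapping out) := by unfold Spec_release_light_join_origin; infer_instance

-- ===== CLAIM (what is proved, stated in full; the proofs are below) =====
def Claim_equal_release_light_join_origin : Prop := ∀ (schema_list : List String) (abbr_mapping : List (String × String)), Dom_release_light_join_origin schema_list abbr_mapping → Pre_release_light_join_origin schema_list abbr_mapping → Spec_release_light_join_origin schema_list abbr_mapping (release_light_join_origin schema_list abbr_mapping)

-- ===== LEMMAS AND PROOFS =====

-- every class in the mapping has ref_table = "release" and is pre-seeded with anchor ("release", ref_col)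
theorem rfm_seed {s : String} {v : String × String × String}
    (h : PySem.Dict.get? releaseForeignMapping s = some v) :
    v.2.1 = "release" ∧
    PySem.Dict.get? seedAnchors (v.2.1, v.2.2) = some ("release", v.2.2) := by
  have hm := PySem.Dict.mem_items_of_get?_eq_some releaseForeignMapping h
  simp [releaseForeignMapping] at hm
  rcases hm with ⟨_, hv⟩ | ⟨_, hv⟩ | ⟨_, hv⟩ | ⟨_, hv⟩ | ⟨_, hv⟩ | ⟨_, hv⟩ | ⟨_, hv⟩ <;>
    subst hv <;> exact ⟨rfl, by decide⟩

-- with the pre-seeded anchors, B's loop never touches the dict and emits exactly A's release-branch strings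
theorem foldB_seed (abbr_mapping : List (String × String)) :
    ∀ (l : List String) (acc : List String),
      l.foldl (stepB abbr_mapping) (acc, seedAnchors) =
        (l.foldl (stepRel abbr_mapping) acc, seedAnchors) := by
  intro l
  induction l with
  | nil => intro acc; rfl
  | cons s l ih =>
    intro acc
    have hstep : stepB abbr_mapping (acc, seedAnchors) s = (stepRel abbr_mapping acc s, seedAnchors) := by
      unfold stepB stepRel
      by_cases hs : s = "release"
      · simp [hs]
      · simp only [if_neg hs]
        cases hv : PySem.Dict.get? releaseForeignMapping s with
        | none => rfl
        | some v =>
          obtain ⟨src, rt, rc⟩ := v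
          obtain ⟨hrt, hseed⟩ := rfm_seed hv
          simp only at hrt hseed
          subst hrt
          simp only [hseed]
          cases PySem.Dict.get? (PySem.Dict.mk abbr_mapping) s <;>
            cases PySem.Dict.get? (PySem.Dict.mk abbr_mapping) "release" <;> rfl
    simp only [List.foldl_cons, hstep, ih]

-- on a non-"release" element, B's step is A's else-branch step
theorem stepB_eq_stepElse (abbr_mapping : List (String × String))
    (st : List String × PySem.Dict (String × String) (String × String))
    {s : String} (hs : s ≠ "release") :
    stepB abbr_mapping st s = stepElse abbr_mapping st s := by
  unfold stepB stepElse
  simp only [if_neg hs]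
  cases PySem.Dict.get? releaseForeignMapping s with
  | none => rfl
  | some v =>
    obtain ⟨src, rt, rc⟩ := v
    rcases h2 : PySem.Dict.get? st.2 (rt, rc) with _ | ⟨a_tbl, a_col⟩ <;> simp [h2]

theorem foldB_eq_foldElse (abbr_mapping : List (String × String)) :
    ∀ (l : List String), "release" ∉ l →
      ∀ (st : List String × PySem.Dict (String × String) (String × String)),
        l.foldl (stepB abbr_mapping) st = l.foldl (stepElse abbr_mapping) st := by
  intro l
  induction l with
  | nil => intro _ st; rfl
  | cons s l ih =>
    intro hmem st
    have hs : s ≠ "release" := fun h => hmem (h ▸ List.mem_cons_self ..)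
    simp only [List.foldl_cons, stepB_eq_stepElse abbr_mapping st hs]
    exact ih (fun h => hmem (List.mem_cons_of_mem _ h)) _

-- ===== VERDICT (by name: the statement is the Claim_ definition above) =====
theorem release_light_join_origin_spec : Claim_equal_release_light_join_origin := by
  intro schema_list abbr_mapping _dom _pre
  unfold Spec_release_light_join_origin release_light_join_origin release_light_join_origin_alt
  cases hc : schema_list.contains "release" with
  | true =>
    simp only [if_true, foldB_seed]
  | false =>
    have hmem : "release" ∉ schema_list := by simp at hc; exact hc
    simp only [Bool.false_eq_true, if_false,
      foldB_eq_foldElse abbr_mapping schema_list hmem]
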